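-- pv_equiv track=rewrite | github.com/ijo0r98/codingtest | programmers/v2/Lv1/모의고사.py | solution
-- ===== SOURCE A (Python) =====
-- def solution(answers):
--     answer = []
--
--     student1 = [1, 2, 3, 4, 5] # 5
--     student2 = [2, 1, 2, 3, 2, 4, 2, 5] # 8
--     student3 = [3, 3, 1, 1, 2, 2, 4, 4, 5, 5] # 10
--
--     score = [0, 0, 0]
--
--     for i in range(len(answers)):
--         if student1[i % 5] == answers[i]:
--             score[0] += 1
--         if student2[i % 8] == answers[i]:
--             score[1] += 1
--         if student3[i % 10] == answers[i]:
--             score[2] += 1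
--
--     max_score = max(score)
--     for i in range(3):
--         if max_score == score[i]:
--             answer.append(i+1)
--
--     return answer
-- ===== SOURCE B (Python) =====
-- def solution(answers):
--     # Bucket the positions by residue class mod 40 (lcm of the pattern periods):
--     # one pass builds a histogram keyed by (i % 40, answer), then each student's
--     # score is read off the 40-entry table instead of rescanning the answers.
--     hist = {}
--     for i, a in enumerate(answers):
--         k = (i % 40, a)
--         hist[k] = hist.get(k, 0) + 1
--     patterns = [[1, 2, 3, 4, 5],
--                 [2, 1, 2, 3, 2, 4, 2, 5],
--                 [3, 3, 1, 1, 2, 2, 4, 4, 5, 5]]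
--     scores = [sum(hist.get((r, p[r % len(p)]), 0) for r in range(40))
--               for p in patterns]
--     best = max(scores)
--     return [i + 1 for i, s in enumerate(scores) if s == best]
-- ===== Notes on version B (the rewrite author's own statement) =====
-- stated objective: alternative
-- what changed: A's interleaved loop comparing each answer against three modular pattern lookups is replaced by a residue-class histogram: one pass buckets answers by (position mod 40, value) into a dict, and each student's score is then read off as 40 table lookups (one per residue class), since every pattern period divides 40.
import Mathlib
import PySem

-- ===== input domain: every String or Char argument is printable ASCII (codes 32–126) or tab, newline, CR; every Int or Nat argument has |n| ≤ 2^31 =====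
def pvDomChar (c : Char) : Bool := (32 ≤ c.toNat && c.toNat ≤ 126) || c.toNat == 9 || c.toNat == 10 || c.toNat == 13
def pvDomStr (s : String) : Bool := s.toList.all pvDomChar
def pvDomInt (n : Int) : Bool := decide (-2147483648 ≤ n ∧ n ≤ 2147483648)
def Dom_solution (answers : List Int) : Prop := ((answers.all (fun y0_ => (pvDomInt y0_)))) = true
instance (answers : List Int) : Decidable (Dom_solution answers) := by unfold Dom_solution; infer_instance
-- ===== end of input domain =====

-- B replaces A's interleaved compare-per-pattern loop by a residue-class histogram: one pass
-- buckets answers by (i % 40, value), then each score is 40 table lookups (objective: alternative).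

-- ===== PORT A =====
-- score is the triple (score[0], score[1], score[2]); all list indices are provably in range, so pyGetD is exact
def solution (answers : List Int) : List Int :=
  let student1 : List Int := [1, 2, 3, 4, 5]
  let student2 : List Int := [2, 1, 2, 3, 2, 4, 2, 5]
  let student3 : List Int := [3, 3, 1, 1, 2, 2, 4, 4, 5, 5]
  let score : Int × Int × Int :=
    (PySem.List.pyRange 0 (answers.length : Int) 1).foldl
      (fun (s : Int × Int × Int) i =>
        (if PySem.List.pyGetD student1 (PySem.Int.mod i 5) 0 == PySem.List.pyGetD answers i 0 then s.1 + 1 else s.1,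
         if PySem.List.pyGetD student2 (PySem.Int.mod i 8) 0 == PySem.List.pyGetD answers i 0 then s.2.1 + 1 else s.2.1,
         if PySem.List.pyGetD student3 (PySem.Int.mod i 10) 0 == PySem.List.pyGetD answers i 0 then s.2.2 + 1 else s.2.2))
      (0, 0, 0)
  let scoreList : List Int := [score.1, score.2.1, score.2.2]
  let max_score : Int := (PySem.List.max? scoreList (fun x => x)).getD 0
  (PySem.List.pyRange 0 3 1).foldl
    (fun (answer : List Int) i =>
      if max_score == PySem.List.pyGetD scoreList i 0 then answer ++ [i + 1] else answer) []

-- ===== PORT B =====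
-- one pass over enumerate(answers) building hist[(i % 40, a)] += 1, then 40 lookups per pattern
def solution_alt (answers : List Int) : List Int :=
  let hist : PySem.Dict (Int × Int) Int :=
    (PySem.List.enumerate answers).foldl
      (fun d ia =>
        let k := (PySem.Int.mod ia.1 40, ia.2)
        d.insert k (d.getD k 0 + 1)) PySem.Dict.empty
  let patterns : List (List Int) :=
    [[1, 2, 3, 4, 5], [2, 1, 2, 3, 2, 4, 2, 5], [3, 3, 1, 1, 2, 2, 4, 4, 5, 5]]
  let scores : List Int := patterns.map (fun p =>
    ((PySem.List.pyRange 0 40 1).map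
      (fun r => hist.getD (r, PySem.List.pyGetD p (PySem.Int.mod r (p.length : Int)) 0) 0)).sum)
  let best : Int := (PySem.List.max? scores (fun x => x)).getD 0
  (PySem.List.enumerate scores).filterMap (fun is => if is.2 == best then some (is.1 + 1) else none)

-- ===== PRECONDITION & SPEC =====
def Spec_solution (answers : List Int) (out : List Int) : Prop := out = solution_alt answers
instance (answers : List Int) (out : List Int) : Decidable (Spec_solution answers out) := by unfold Spec_solution; infer_instance

-- ===== CLAIM (what is proved, stated in full; the proofs are below) =====
def Claim_equal_solution : Prop := ∀ (answers : List Int), Dom_solution answers → Spec_solution answers (solution answers)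

-- ===== LEMMAS AND PROOFS =====

-- per-student count written with Nat indices, oriented like A's comparison
def pvCnt (p answers : List Int) : Int :=
  (List.range answers.length).foldl
    (fun (s : Int) k => if p.getD (k % p.length) 0 == answers.getD k 0 then s + 1 else s) 0

-- A's per-student fold over pyRange equals the Nat-indexed count
lemma pv_foldA_eq_cnt (p answers : List Int) (mI : Int) (hm : mI = (p.length : Int)) :
    (PySem.List.pyRange 0 (answers.length : Int) 1).foldl
      (fun (s : Int) i =>
        if PySem.List.pyGetD p (PySem.Int.mod i mI) 0 == PySem.List.pyGetD answers i 0
        then s + 1 else s) 0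
      = pvCnt p answers := by
  subst hm
  rw [PySem.List.pyRange_zero_nat, List.foldl_map]
  unfold pvCnt
  apply PySem.List.foldl_congr_mem
  intro acc k hk
  rw [PySem.Int.mod_natCast, PySem.List.pyGetD_natCast, PySem.List.pyGetD_natCast]

-- sum over a nodup list of 'hit exactly at a' collapses to one term
lemma pv_collapse (l : List Int) (hl : l.Nodup) (a : Int) (f : Int → Int) :
    (l.map (fun r => if a == r then f r else 0)).sum = if a ∈ l then f a else 0 := by
  induction l with
  | nil => simp
  | cons r t ih =>
    rw [List.nodup_cons] at hl
    rw [List.map_cons, List.sum_cons, ih hl.2]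
    by_cases h : a = r
    · subst h
      simp [hl.1]
    · simp [h, beq_iff_eq]

-- summing the histogram's counts over the 40 residue classes counts the matches
lemma pv_sum_count (a : Nat → Int) (P : Int → Int) (n : Nat) :
    ((PySem.List.pyRange 0 40 1).map
        (fun r => (((List.range n).map (fun k => ((((k % 40 : Nat)) : Int), a k))).count (r, P r) : Int))).sum
      = ((List.range n).map
          (fun k => if a k == P (((k % 40 : Nat)) : Int) then (1 : Int) else 0)).sum := by
  induction n with
  | zero => simp
  | succ n ih =>
    rw [List.range_succ]
    simp only [List.map_append, List.count_append, List.map_cons, List.map_nil, Nat.cast_add]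
    rw [PySem.List.sum_map_add_int, ih, List.sum_append, List.sum_cons, List.sum_nil]
    have hcnt : ∀ r : Int,
        (([((((n % 40 : Nat)) : Int), a n)].count (r, P r) : Int))
          = if (((n % 40 : Nat)) : Int) == r then (if a n == P r then (1 : Int) else 0) else 0 := by
      intro r
      rw [List.count_cons, List.count_nil]
      simp only [beq_iff_eq, Prod.mk.injEq, Nat.zero_add]
      split_ifs <;> simp_all
    have hmem : ((((n % 40 : Nat)) : Int)) ∈ PySem.List.pyRange 0 40 1 := by
      rw [PySem.List.mem_pyRange_one]
      constructor
      · omega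
      · omega
    have hnew : ((PySem.List.pyRange 0 40 1).map
        (fun r => (([((((n % 40 : Nat)) : Int), a n)].count (r, P r) : Int)))).sum
        = if a n == P (((n % 40 : Nat)) : Int) then (1 : Int) else 0 := by
      simp only [hcnt]
      exact (pv_collapse (PySem.List.pyRange 0 40 1) (PySem.List.nodup_pyRange_one 0 40)
        (((n % 40 : Nat)) : Int) (fun r => if a n == P r then (1 : Int) else 0)).trans
        (by rw [if_pos hmem])
    rw [hnew]
    ring

-- keys built from enumerate = keys built from Nat indices
lemma pv_enum_mod_map (xs : List Int) (s : Nat) :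
    (PySem.List.enumerate xs ((s : Nat) : Int)).map (fun ia => (PySem.Int.mod ia.1 40, ia.2))
      = (List.range xs.length).map
          (fun k => ((((s + k) % 40 : Nat) : Int), xs.getD k 0)) := by
  induction xs generalizing s with
  | nil => simp [PySem.List.enumerate_nil]
  | cons x t ih =>
    rw [PySem.List.enumerate_cons]
    have hmod : PySem.Int.mod ((s : Nat) : Int) 40 = (((s % 40 : Nat)) : Int) := by
      exact_mod_cast PySem.Int.mod_natCast s 40
    have hs1 : ((s : Nat) : Int) + 1 = (((s + 1 : Nat)) : Int) := by push_cast; ring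
    rw [List.map_cons, hmod, hs1, ih (s + 1)]
    simp only [List.length_cons, List.range_succ_eq_map, List.map_cons, List.map_map]
    refine List.cons_eq_cons.mpr ⟨by simp, ?_⟩
    apply List.map_congr_left
    intro k _
    simp only [Function.comp, Nat.succ_eq_add_one, List.getD_cons_succ]
    have h : s + 1 + k = s + (k + 1) := by omega
    rw [h]

-- B's per-pattern histogram sum equals the Nat-indexed count, for a period dividing 40
lemma pv_scoreB (answers p : List Int) (hd : p.length ∣ 40) :
    ((PySem.List.pyRange 0 40 1).map
        (fun r => (PySem.Dict.counter
            ((PySem.List.enumerate answers).map (fun ia => (PySem.Int.mod ia.1 40, ia.2)))).getD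
          (r, PySem.List.pyGetD p (PySem.Int.mod r (p.length : Int)) 0) 0)).sum
      = pvCnt p answers := by
  rw [show (PySem.List.enumerate answers) = PySem.List.enumerate answers ((0 : Nat) : Int) from rfl,
    pv_enum_mod_map answers 0]
  simp only [PySem.Dict.getD_counter, Nat.zero_add]
  rw [pv_sum_count (fun k => answers.getD k 0)
      (fun r => PySem.List.pyGetD p (PySem.Int.mod r (p.length : Int)) 0) answers.length]
  have hP : ∀ k : Nat,
      PySem.List.pyGetD p (PySem.Int.mod (((k % 40 : Nat)) : Int) (p.length : Int)) 0
        = p.getD (k % p.length) 0 := by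
    intro k
    rw [PySem.Int.mod_natCast, PySem.List.pyGetD_natCast, Nat.mod_mod_of_dvd k hd]
  simp only [hP]
  unfold pvCnt
  rw [PySem.List.foldl_if_add_one (fun k => p.getD (k % p.length) 0 == answers.getD k 0),
    PySem.List.sum_map_ite_one_zero]
  have hc : List.countP (fun k => answers.getD k 0 == p.getD (k % p.length) 0) (List.range answers.length)
      = List.countP (fun k => p.getD (k % p.length) 0 == answers.getD k 0) (List.range answers.length) :=
    List.countP_congr (fun k _ => by rw [Bool.beq_comm])
  omega

-- the port's one-pass dict build is Counter of the (i % 40, a) key list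
lemma pv_hist_eq (answers : List Int) :
    (PySem.List.enumerate answers).foldl
      (fun (d : PySem.Dict (Int × Int) Int) ia =>
        d.insert (PySem.Int.mod ia.1 40, ia.2) (d.getD (PySem.Int.mod ia.1 40, ia.2) 0 + 1))
      PySem.Dict.empty
      = PySem.Dict.counter
          ((PySem.List.enumerate answers).map (fun ia => (PySem.Int.mod ia.1 40, ia.2))) := by
  rw [← PySem.Dict.foldl_insert_getD_add_one_eq_counter, List.foldl_map]

-- ===== VERDICT (by name: the statement is the Claim_ definition above) =====
theorem solution_spec : Claim_equal_solution := by
  intro answers _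
  unfold Spec_solution solution solution_alt
  simp only []
  rw [PySem.List.foldl_prod_mk
      (f := fun (s : Int) i =>
        if PySem.List.pyGetD ([1,2,3,4,5] : List Int) (PySem.Int.mod i 5) 0 == PySem.List.pyGetD answers i 0 then s + 1 else s)
      (g := fun (s : Int × Int) i =>
        (if PySem.List.pyGetD ([2,1,2,3,2,4,2,5] : List Int) (PySem.Int.mod i 8) 0 == PySem.List.pyGetD answers i 0 then s.1 + 1 else s.1,
         if PySem.List.pyGetD ([3,3,1,1,2,2,4,4,5,5] : List Int) (PySem.Int.mod i 10) 0 == PySem.List.pyGetD answers i 0 then s.2 + 1 else s.2)),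
    PySem.List.foldl_prod_mk
      (f := fun (s : Int) i =>
        if PySem.List.pyGetD ([2,1,2,3,2,4,2,5] : List Int) (PySem.Int.mod i 8) 0 == PySem.List.pyGetD answers i 0 then s + 1 else s)
      (g := fun (s : Int) i =>
        if PySem.List.pyGetD ([3,3,1,1,2,2,4,4,5,5] : List Int) (PySem.Int.mod i 10) 0 == PySem.List.pyGetD answers i 0 then s + 1 else s)]
  rw [pv_foldA_eq_cnt ([1,2,3,4,5] : List Int) answers 5 (by norm_num),
    pv_foldA_eq_cnt ([2,1,2,3,2,4,2,5] : List Int) answers 8 (by norm_num),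
    pv_foldA_eq_cnt ([3,3,1,1,2,2,4,4,5,5] : List Int) answers 10 (by norm_num)]
  rw [pv_hist_eq answers]
  simp only [List.map_cons, List.map_nil]
  simp only [pv_scoreB answers ([1,2,3,4,5] : List Int) (by norm_num),
    pv_scoreB answers ([2,1,2,3,2,4,2,5] : List Int) (by norm_num),
    pv_scoreB answers ([3,3,1,1,2,2,4,4,5,5] : List Int) (by norm_num)]
  have hr3 : PySem.List.pyRange 0 3 1 = [0, 1, 2] := by decide
  rw [hr3]
  simp only [PySem.List.enumerate, List.foldl_cons, List.foldl_nil, List.filterMap]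
  simp only [PySem.List.max?_id_cons, Option.getD_some, List.foldl_cons, List.foldl_nil]
  have g1 : ∀ a b c : Int, PySem.List.pyGetD [a, b, c] 0 0 = a := fun _ _ _ => rfl
  have g2 : ∀ a b c : Int, PySem.List.pyGetD [a, b, c] 1 0 = b := fun _ _ _ => rfl
  have g3 : ∀ a b c : Int, PySem.List.pyGetD [a, b, c] 2 0 = c := fun _ _ _ => rfl
  rw [g1, g2, g3]
  generalize pvCnt ([1,2,3,4,5] : List Int) answers = c1
  generalize pvCnt ([2,1,2,3,2,4,2,5] : List Int) answers = c2
  generalize pvCnt ([3,3,1,1,2,2,4,4,5,5] : List Int) answers = c3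
  generalize max (max c1 c2) c3 = m
  simp only [beq_iff_eq]
  split_ifs <;> first | omega | simp
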